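-- pv_equiv track=rewrite | github.com/Applied-Linear-Algebra-NIT/Connect-4 | Answers/connect4.py | check_up_left
-- ===== SOURCE A (Python) =====
-- def check_up_left(i, j, board, count, icon):
--     try:
--         if board[i][j] == icon and count == 0:
--             return True
--         elif board[i][j] == icon:
--             return check_up_left(i-1, j-1, board, count-1, icon)
--         else:
--             return False
--     except:
--         return False
-- ===== SOURCE B (Python) =====
-- def check_up_left(i, j, board, count, icon):
--     # A run of negative length can never exist.
--     if count < 0:
--         return False
--     try:
--         return all(board[i - k][j - k] == icon for k in range(count + 1))
--     except IndexError:
--         return False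
-- ===== Notes on version B (the rewrite author's own statement) =====
-- stated objective: simpler
-- what changed: Replaces A's decrement-and-recurse walk wrapped in try/except by a count<0 guard plus a lazy all() over range(count+1) checking board[i-k][j-k], catching IndexError; no recursion and no count bookkeeping in the loop.
import Mathlib
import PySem

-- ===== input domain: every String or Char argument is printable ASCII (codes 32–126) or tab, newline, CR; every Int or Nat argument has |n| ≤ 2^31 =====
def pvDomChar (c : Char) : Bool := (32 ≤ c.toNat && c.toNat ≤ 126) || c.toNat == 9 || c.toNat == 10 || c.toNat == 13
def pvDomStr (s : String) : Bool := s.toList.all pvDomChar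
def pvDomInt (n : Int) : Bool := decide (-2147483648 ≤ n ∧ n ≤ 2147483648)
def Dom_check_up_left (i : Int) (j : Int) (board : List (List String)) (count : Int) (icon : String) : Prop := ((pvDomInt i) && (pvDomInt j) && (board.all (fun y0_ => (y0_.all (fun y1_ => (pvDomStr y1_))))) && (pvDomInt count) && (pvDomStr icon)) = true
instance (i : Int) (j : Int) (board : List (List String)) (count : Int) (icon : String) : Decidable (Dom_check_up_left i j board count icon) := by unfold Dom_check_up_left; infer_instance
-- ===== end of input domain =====

-- B replaces A's decrement-and-recurse walk (try/except) by a count<0 guard plus a lazy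
-- bounded scan over range(count+1); objective: simpler, same behaviour proved equal everywhere.

-- ===== PORT A =====
-- literal port of A: recursion, bare except = the two pyGet? 'none' cases return False
def check_up_left (i : Int) (j : Int) (board : List (List String)) (count : Int) (icon : String) : Bool :=
  match h : PySem.List.pyGet? board i with
  | none => false
  | some row =>
    match PySem.List.pyGet? row j with
    | none => false
    | some cell =>
      if cell == icon && count == 0 then true
      else if cell == icon then check_up_left (i-1) (j-1) board (count-1) icon
      else false
termination_by (i + board.length + 1).toNat
decreasing_by
  have hin : PySem.Raise.InRange board.length i := by
    by_contra hc
    rw [← PySem.List.pyGet?_eq_none_iff (xs := board) (i := i)] at hc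
    simp [hc] at h
  unfold PySem.Raise.InRange at hin
  omega

-- ===== PORT B =====
-- port of Source B's generator: lazy 'all' over range(count+1); a 'none' index = the caught IndexError
def altAll (i : Int) (j : Int) (board : List (List String)) (icon : String) : List Int → Bool
  | [] => true
  | k :: ks =>
    match PySem.List.pyGet? board (i - k) with
    | none => false
    | some row =>
      match PySem.List.pyGet? row (j - k) with
      | none => false
      | some cell => if cell == icon then altAll i j board icon ks else false

def check_up_left_alt (i : Int) (j : Int) (board : List (List String)) (count : Int) (icon : String) : Bool :=
  if count < 0 then false
  else altAll i j board icon (PySem.List.pyRange 0 (count + 1) 1)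

-- ===== PRECONDITION & SPEC =====
def Spec_check_up_left (i : Int) (j : Int) (board : List (List String)) (count : Int) (icon : String) (out : Bool) : Prop := out = check_up_left_alt i j board count icon
instance (i : Int) (j : Int) (board : List (List String)) (count : Int) (icon : String) (out : Bool) : Decidable (Spec_check_up_left i j board count icon out) := by unfold Spec_check_up_left; infer_instance

-- ===== CLAIM (what is proved, stated in full; the proofs are below) =====
def Claim_equal_check_up_left : Prop := ∀ (i : Int) (j : Int) (board : List (List String)) (count : Int) (icon : String), Dom_check_up_left i j board count icon → Spec_check_up_left i j board count icon (check_up_left i j board count icon)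

-- ===== LEMMAS AND PROOFS =====

-- plain (non-dependent) unfolding of the recursive port
lemma check_up_left_eq (i j : Int) (board : List (List String)) (count : Int) (icon : String) :
  check_up_left i j board count icon =
    match PySem.List.pyGet? board i with
    | none => false
    | some row =>
      match PySem.List.pyGet? row j with
      | none => false
      | some cell =>
        if cell == icon && count == 0 then true
        else if cell == icon then check_up_left (i-1) (j-1) board (count-1) icon
        else false := by
  rw [check_up_left]
  split
  next heq => rw [heq]
  next row heq => rw [heq]

-- With a negative count A can never hit its count==0 base case: it walks until IndexError → False.
lemma A_false_of_neg (board : List (List String)) (icon : String) :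
    ∀ (n : Nat) (i j count : Int), (i + board.length + 1).toNat ≤ n → count < 0 →
      check_up_left i j board count icon = false := by
  intro n
  induction n with
  | zero =>
    intro i j count hm _
    rw [check_up_left_eq]
    have hnone : PySem.List.pyGet? board i = none := by
      rw [PySem.List.pyGet?_eq_none_iff]
      unfold PySem.Raise.InRange
      omega
    rw [hnone]
  | succ n ih =>
    intro i j count hm hc
    rw [check_up_left_eq]
    split
    · rfl
    next row hrow =>
      split
      · rfl
      next cell _ =>
        have hin : PySem.Raise.InRange board.length i := by
          by_contra hx
          rw [← PySem.List.pyGet?_eq_none_iff (xs := board) (i := i)] at hx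
          simp [hx] at hrow
        unfold PySem.Raise.InRange at hin
        have h0 : (count == 0) = false := by simp; omega
        rw [h0, Bool.and_false, if_neg (by simp)]
        by_cases hcell : cell == icon
        · rw [if_pos hcell]
          exact ih (i-1) (j-1) (count-1) (by omega) (by omega)
        · rw [if_neg hcell]

-- With count = n ≥ 0, A's walk from (i,j) equals B's scan of range(a, a+n+1) started at offset a.
lemma A_eq_altAll (board : List (List String)) (icon : String) :
    ∀ (n : Nat) (a i j : Int),
      check_up_left i j board (n : Int) icon
        = altAll (i + a) (j + a) board icon (PySem.List.pyRange a (a + (n : Int) + 1) 1) := by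
  intro n
  induction n with
  | zero =>
    intro a i j
    have hsing : PySem.List.pyRange a (a + ((0:Nat):Int) + 1) 1 = [a] := by
      simp [PySem.List.pyRange_one_singleton]
    rw [check_up_left_eq, hsing]
    simp only [altAll, add_sub_cancel_right]
    split
    · rfl
    next row hb =>
      split
      · rfl
      next cell hr =>
        by_cases hcell : cell == icon
        · simp [hcell]
        · simp [hcell]
  | succ n ih =>
    intro a i j
    have hcons : PySem.List.pyRange a (a + ((n:Int) + 1) + 1) 1
        = a :: PySem.List.pyRange (a+1) (a + ((n:Int) + 1) + 1) 1 :=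
      PySem.List.pyRange_one_cons (by omega)
    rw [check_up_left_eq]
    push_cast
    rw [hcons]
    simp only [altAll, add_sub_cancel_right]
    split
    · rfl
    next row hb =>
      split
      · rfl
      next cell hr =>
        have h0 : ((n:Int) + 1 == 0) = false := by simp; omega
        rw [h0, Bool.and_false, if_neg (by simp)]
        by_cases hcell : cell == icon
        · rw [if_pos hcell, if_pos hcell]
          rw [ih (a+1) (i-1) (j-1)]
          have e1 : i - 1 + (a + 1) = i + a := by ring
          have e2 : j - 1 + (a + 1) = j + a := by ring
          have e3 : a + 1 + (n:Int) + 1 = a + ((n:Int) + 1) + 1 := by ring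
          rw [e1, e2, e3]
        · rw [if_neg hcell, if_neg hcell]

-- ===== VERDICT (by name: the statement is the Claim_ definition above) =====
theorem check_up_left_spec : Claim_equal_check_up_left := by
  intro i j board count icon _
  unfold Spec_check_up_left check_up_left_alt
  by_cases hneg : count < 0
  · rw [if_pos hneg]
    exact A_false_of_neg board icon _ i j count le_rfl hneg
  · rw [if_neg hneg]
    obtain ⟨n, rfl⟩ : ∃ n : Nat, count = (n : Int) :=
      ⟨count.toNat, by omega⟩
    have := A_eq_altAll board icon n 0 i j
    simpa using this
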